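-- pv_equiv track=rewrite | github.com/JulianAFO98/Python-Uni | Guia_4/shanon_huffman.py | byte_tiene_errores
-- ===== SOURCE A (Python) =====
-- def byte_tiene_errores(byte,tipoParidad=0):
--     bit_paridad = byte & 1 # tomo el menos significativo
--     byte = byte >> 1
--     contador_bits = 0
--     for i in range(8):
--         bit = (byte >> (7 - i)) & 1  # del bit más significativo al menos
--         contador_bits+=bit
--
--     if tipoParidad == 0:
--         bit_esperado = 0 if contador_bits % 2 == 0 else 1
--     else:
--         bit_esperado = 1 if contador_bits % 2 == 0 else 0
--
--     return bit_paridad != bit_esperado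
-- ===== SOURCE B (Python) =====
-- def byte_tiene_errores(byte, tipoParidad=0):
--     bit_paridad = byte & 1
--     x = (byte >> 1) & 0xFF
--     x ^= x >> 4
--     x ^= x >> 2
--     x ^= x >> 1
--     parity = x & 1
--     bit_esperado = parity if tipoParidad == 0 else 1 - parity
--     return bit_paridad != bit_esperado
-- ===== Notes on version B (the rewrite author's own statement) =====
-- stated objective: alternative
-- what changed: Replaces A's 8-iteration loop that extracts and sums the data bits one by one with a branch-free bit-parallel parity reduction: mask the 8-bit window with & 0xFF and fold it with three XOR shifts (x ^= x>>4; x ^= x>>2; x ^= x>>1), whose low bit is the bit count mod 2.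
import Mathlib
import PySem

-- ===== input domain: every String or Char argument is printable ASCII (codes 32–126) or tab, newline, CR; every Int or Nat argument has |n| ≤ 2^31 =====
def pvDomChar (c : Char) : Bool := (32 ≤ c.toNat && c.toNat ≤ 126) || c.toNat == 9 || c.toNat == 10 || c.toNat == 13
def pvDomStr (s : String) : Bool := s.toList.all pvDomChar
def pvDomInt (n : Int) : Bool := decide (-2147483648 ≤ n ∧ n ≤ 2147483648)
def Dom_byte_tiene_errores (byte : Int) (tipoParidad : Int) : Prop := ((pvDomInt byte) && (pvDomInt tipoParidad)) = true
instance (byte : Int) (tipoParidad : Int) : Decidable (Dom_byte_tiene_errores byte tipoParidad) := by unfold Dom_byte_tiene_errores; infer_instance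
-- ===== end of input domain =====

-- B replaces A's 8-iteration bit-counting loop by a bit-parallel XOR parity fold of the masked 8-bit window (alternative decomposition, same cost class).

-- ===== PORT A =====
-- Python's '>>' is Lean's '>>>' (arithmetic shift); the shift counts 7-i lie in 0..7, so '.toNat' is exact here.
def byte_tiene_errores (byte : Int) (tipoParidad : Int) : Bool :=
  let bit_paridad := PySem.Int.band byte 1
  let byte1 := byte >>> (1 : Nat)
  let contador_bits := (PySem.List.pyRange 0 8 1).foldl
    (fun acc i => acc + PySem.Int.band (byte1 >>> (7 - i).toNat) 1) 0
  let bit_esperado : Int :=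
    if tipoParidad == 0 then (if PySem.Int.mod contador_bits 2 == 0 then 0 else 1)
    else (if PySem.Int.mod contador_bits 2 == 0 then 1 else 0)
  bit_paridad != bit_esperado

-- ===== PORT B =====
def byte_tiene_errores_alt (byte : Int) (tipoParidad : Int) : Bool :=
  let bit_paridad := PySem.Int.band byte 1
  let x0 := PySem.Int.band (byte >>> (1 : Nat)) 255
  let x1 := PySem.Int.bxor x0 (x0 >>> (4 : Nat))
  let x2 := PySem.Int.bxor x1 (x1 >>> (2 : Nat))
  let x3 := PySem.Int.bxor x2 (x2 >>> (1 : Nat))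
  let parity := PySem.Int.band x3 1
  let bit_esperado := if tipoParidad == 0 then parity else 1 - parity
  bit_paridad != bit_esperado

-- ===== PRECONDITION & SPEC =====
def Spec_byte_tiene_errores (byte : Int) (tipoParidad : Int) (out : Bool) : Prop := out = byte_tiene_errores_alt byte tipoParidad
instance (byte : Int) (tipoParidad : Int) (out : Bool) : Decidable (Spec_byte_tiene_errores byte tipoParidad out) := by unfold Spec_byte_tiene_errores; infer_instance

-- ===== CLAIM (what is proved, stated in full; the proofs are below) =====
def Claim_equal_byte_tiene_errores : Prop := ∀ (byte : Int) (tipoParidad : Int), Dom_byte_tiene_errores byte tipoParidad → Spec_byte_tiene_errores byte tipoParidad (byte_tiene_errores byte tipoParidad)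

-- ===== LEMMAS AND PROOFS =====

-- Python-exact mask: a & 255 = a % 256 (also for negative a).
lemma pv_band255 (a : Int) : PySem.Int.band a 255 = a % 256 := by
  unfold PySem.Int.band
  have h255 : ∀ n : Nat, n &&& 255 = n % 256 := fun n => by
    have := Nat.and_two_pow_sub_one_eq_mod n 8; norm_num at this; omega
  split_ifs with h1 h2 h2
  · rw [show ((255:Int)).toNat = 255 from rfl, h255]; omega
  · omega
  · rw [show ((255:Int)).toNat = 255 from rfl, Nat.and_comm, h255]; omega
  · omega

-- Int >>> (n : Int) with a Nat-cast count is floor division by 2^n.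
lemma pv_sInt (m : Int) (n : Nat) : m >>> ((n:Nat) : Int) = m / ((2^n : Nat) : Int) := by
  rcases m with m | m
  · show ((m:Int)) >>> ((n:Nat) : Int) = _
    rw [Int.shiftRight_natCast]
    simp [Nat.shiftRight_eq_div_pow]
  · rw [Int.shiftRight_negSucc]
    have h1 : m >>> n = m / 2^n := Nat.shiftRight_eq_div_pow m n
    have hk : (0:Int) < ((2^n : Nat) : Int) := by positivity
    set k : Int := ((2^n : Nat) : Int) with hkdef
    set q : Int := ((m / 2^n : Nat) : Int) with hq
    set r : Int := ((m % 2^n : Nat) : Int) with hrr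
    have h2 : r < k := by rw [hrr, hkdef]; exact_mod_cast Nat.mod_lt _ (by positivity)
    have h2' : 0 ≤ r := by rw [hrr]; positivity
    have h3 : k * q + r = (m:Int) := by rw [hkdef, hq, hrr]; exact_mod_cast Nat.div_add_mod m (2^n)
    have key : (-((m:Int)+1)) = (k - r - 1) + k * (-q-1) := by ring_nf; omega
    rw [show Int.negSucc m = -((m:Int)+1) from Int.negSucc_eq m, key,
      Int.add_mul_ediv_left _ _ (ne_of_gt hk),
      Int.ediv_eq_zero_of_lt (by omega) (by omega)]
    omega

lemma pv_A_tne (byte t : Int) (ht : t ≠ 0) : byte_tiene_errores byte t = byte_tiene_errores byte 1 := by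
  simp [byte_tiene_errores, ht]

lemma pv_B_tne (byte t : Int) (ht : t ≠ 0) : byte_tiene_errores_alt byte t = byte_tiene_errores_alt byte 1 := by
  simp [byte_tiene_errores_alt, ht]

-- A only reads the low 9 bits of byte.
lemma pv_reduceA (byte t : Int) : byte_tiene_errores byte t = byte_tiene_errores (byte % 512) t := by
  have hr : PySem.List.pyRange 0 8 1 = [0,1,2,3,4,5,6,7] := by decide
  have h2 : (0:Int) < 2 := by norm_num
  simp only [byte_tiene_errores, hr, List.foldl, PySem.Int.band_one, PySem.Int.mod_eq_emod_of_pos h2,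
    Int.shiftRight_eq_div_pow, pv_sInt,
    show ((2 ^ ((7:Int)-0).toNat : Nat) : Int) = 128 from rfl,
    show ((2 ^ ((7:Int)-1).toNat : Nat) : Int) = 64 from rfl,
    show ((2 ^ ((7:Int)-2).toNat : Nat) : Int) = 32 from rfl,
    show ((2 ^ ((7:Int)-3).toNat : Nat) : Int) = 16 from rfl,
    show ((2 ^ ((7:Int)-4).toNat : Nat) : Int) = 8 from rfl,
    show ((2 ^ ((7:Int)-5).toNat : Nat) : Int) = 4 from rfl,
    show ((2 ^ ((7:Int)-6).toNat : Nat) : Int) = 2 from rfl,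
    show ((2 ^ ((7:Int)-7).toNat : Nat) : Int) = 1 from rfl,
    show ((2 ^ (1:Nat) : Nat) : Int) = 2 from rfl]
  rw [show byte % 2 = byte % 512 % 2 from by omega,
    show byte / 2 / 128 % 2 = byte % 512 / 2 / 128 % 2 from by omega,
    show byte / 2 / 64 % 2 = byte % 512 / 2 / 64 % 2 from by omega,
    show byte / 2 / 32 % 2 = byte % 512 / 2 / 32 % 2 from by omega,
    show byte / 2 / 16 % 2 = byte % 512 / 2 / 16 % 2 from by omega,
    show byte / 2 / 8 % 2 = byte % 512 / 2 / 8 % 2 from by omega,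
    show byte / 2 / 4 % 2 = byte % 512 / 2 / 4 % 2 from by omega,
    show byte / 2 / 2 % 2 = byte % 512 / 2 / 2 % 2 from by omega,
    show byte / 2 / 1 % 2 = byte % 512 / 2 / 1 % 2 from by omega]

-- B only reads the low 9 bits of byte.
lemma pv_reduceB (byte t : Int) : byte_tiene_errores_alt byte t = byte_tiene_errores_alt (byte % 512) t := by
  have h2 : (0:Int) < 2 := by norm_num
  simp only [byte_tiene_errores_alt, pv_band255, PySem.Int.band_one, PySem.Int.mod_eq_emod_of_pos h2,
    Int.shiftRight_eq_div_pow,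
    show ((2 ^ (1:Nat) : Nat) : Int) = 2 from rfl,
    show ((2 ^ (2:Nat) : Nat) : Int) = 4 from rfl,
    show ((2 ^ (4:Nat) : Nat) : Int) = 16 from rfl]
  rw [show byte % 512 / 2 % 256 = byte / 2 % 256 from by omega,
      show byte % 512 % 2 = byte % 2 from by omega]

set_option maxHeartbeats 1000000 in
set_option maxRecDepth 10000 in
lemma pv_small : ∀ v : Fin 512,
    byte_tiene_errores ((v.val : Nat) : Int) 0 = byte_tiene_errores_alt ((v.val : Nat) : Int) 0 ∧
    byte_tiene_errores ((v.val : Nat) : Int) 1 = byte_tiene_errores_alt ((v.val : Nat) : Int) 1 := by decide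

-- ===== VERDICT (by name: the statement is the Claim_ definition above) =====
theorem byte_tiene_errores_spec : Claim_equal_byte_tiene_errores := by
  intro byte t _
  unfold Spec_byte_tiene_errores
  have h0 : 0 ≤ byte % 512 := Int.emod_nonneg _ (by norm_num)
  have h1 : byte % 512 < 512 := Int.emod_lt_of_pos _ (by norm_num)
  have hlt : (byte % 512).toNat < 512 := by omega
  have hcast : (((byte % 512).toNat : Nat) : Int) = byte % 512 := by omega
  rcases eq_or_ne t 0 with ht|ht
  · subst ht
    rw [pv_reduceA, pv_reduceB, ← hcast]
    exact (pv_small ⟨(byte % 512).toNat, hlt⟩).1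
  · rw [pv_reduceA, pv_reduceB, pv_A_tne _ _ ht, pv_B_tne _ _ ht, ← hcast]
    exact (pv_small ⟨(byte % 512).toNat, hlt⟩).2
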